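-- pv_equiv track=rewrite | github.com/Anu192/Codechef | Practice questions/EZSPEAK.py | is_easy
-- ===== SOURCE A (Python) =====
-- def is_easy(s):
--   const = 0
--   for c in s:
--     if c not in "aeiou":
--       const += 1
--     else:
--       const = 0
--     if const >= 4:
--       return False
--   return True
-- ===== SOURCE B (Python) =====
-- def is_easy(s):
--     # Sliding-window check: every length-4 window must contain a vowel.
--     return all(any(c in "aeiou" for c in s[i:i+4]) for i in range(len(s) - 3))
-- ===== Notes on version B (the rewrite author's own statement) =====
-- stated objective: alternative
-- what changed: Replaces the running consonant counter with early return by a sliding-window scan that checks every length-4 substring for a vowel.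
import Mathlib
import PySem

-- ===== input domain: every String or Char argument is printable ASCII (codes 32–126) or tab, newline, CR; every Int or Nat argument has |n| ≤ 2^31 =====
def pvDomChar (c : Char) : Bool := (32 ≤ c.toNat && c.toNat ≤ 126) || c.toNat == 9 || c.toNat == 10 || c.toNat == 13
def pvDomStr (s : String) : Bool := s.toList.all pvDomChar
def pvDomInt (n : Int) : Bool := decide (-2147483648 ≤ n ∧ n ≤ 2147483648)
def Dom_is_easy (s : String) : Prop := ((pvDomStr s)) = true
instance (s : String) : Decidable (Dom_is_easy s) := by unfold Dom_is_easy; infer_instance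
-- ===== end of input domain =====

-- B checks every length-4 window for a vowel instead of A's running consonant counter (alternative decomposition, same cost).

-- 'c in "aeiou"' for a single character: membership in the vowel list
def isEasyVow (c : Char) : Bool := ['a', 'e', 'i', 'o', 'u'].contains c

-- ===== PORT A =====
def isEasyLoop : List Char → Int → Bool
  | [], _ => true
  | c :: rest, const =>
    let const' := if !(isEasyVow c) then const + 1 else 0
    if const' ≥ 4 then false else isEasyLoop rest const'

def is_easy (s : String) : Bool := isEasyLoop s.toList 0

-- ===== PORT B =====
def is_easy_alt (s : String) : Bool :=
  let l := s.toList
  (PySem.List.pyRange 0 ((l.length : Int) - 3) 1).all (fun i =>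
    (PySem.List.slice l (some i) (some (i + 4))).any isEasyVow)

-- ===== PRECONDITION & SPEC =====
def Spec_is_easy (s : String) (out : Bool) : Prop := out = is_easy_alt s
instance (s : String) (out : Bool) : Decidable (Spec_is_easy s out) := by unfold Spec_is_easy; infer_instance

-- ===== CLAIM (what is proved, stated in full; the proofs are below) =====
def Claim_equal_is_easy : Prop := ∀ (s : String), Dom_is_easy s → Spec_is_easy s (is_easy s)

-- ===== LEMMAS AND PROOFS =====

-- mid-level spec: scan the windows recursively
def isEasyW : List Char → Bool
  | a :: b :: c :: d :: rest =>
      (isEasyVow a || isEasyVow b || isEasyVow c || isEasyVow d) && isEasyW (b :: c :: d :: rest)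
  | _ => true

-- length of the maximal consonant prefix
def isEasyLead : List Char → Nat
  | [] => 0
  | c :: rest => if isEasyVow c then 0 else isEasyLead rest + 1

lemma lead_le_length (l : List Char) : isEasyLead l ≤ l.length := by
  induction l with
  | nil => simp [isEasyLead]
  | cons c rest ih => simp only [isEasyLead, List.length_cons]; split <;> omega

lemma w_false_of_lead (l : List Char) (h : 4 ≤ isEasyLead l) : isEasyW l = false := by
  rcases l with _ | ⟨a, _ | ⟨b, _ | ⟨c, _ | ⟨d, r⟩⟩⟩⟩
  · simp [isEasyLead] at h
  · have h1 := lead_le_length [a]; simp at h1; omega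
  · have h1 := lead_le_length [a, b]; simp at h1; omega
  · have h1 := lead_le_length [a, b, c]; simp at h1; omega
  · simp only [isEasyLead] at h
    by_cases ha : isEasyVow a = true <;> by_cases hb : isEasyVow b = true <;>
      by_cases hc : isEasyVow c = true <;> by_cases hd : isEasyVow d = true <;>
      simp [ha, hb, hc, hd, isEasyW] at h ⊢

lemma w_cons_of_lead_le (c : Char) (rest : List Char) (h : isEasyLead rest ≤ 2) :
    isEasyW (c :: rest) = isEasyW rest := by
  rcases rest with _ | ⟨a, _ | ⟨b, _ | ⟨d, r⟩⟩⟩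
  · simp [isEasyW]
  · simp [isEasyW]
  · simp [isEasyW]
  · simp only [isEasyLead] at h
    by_cases ha : isEasyVow a = true <;> by_cases hb : isEasyVow b = true <;>
      by_cases hd : isEasyVow d = true <;>
      simp [ha, hb, hd, isEasyW] at h ⊢

lemma w_cons_vowel (c : Char) (rest : List Char) (hv : isEasyVow c = true) :
    isEasyW (c :: rest) = isEasyW rest := by
  rcases rest with _ | ⟨a, _ | ⟨b, _ | ⟨d, r⟩⟩⟩ <;> simp [isEasyW, hv]

lemma loopA_eq (l : List Char) : ∀ k : Nat, k ≤ 3 →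
    isEasyLoop l (k : Int) = (isEasyW l && decide (k + isEasyLead l ≤ 3)) := by
  induction l with
  | nil => intro k hk; simp [isEasyLoop, isEasyW, isEasyLead, hk]
  | cons c rest ih =>
    intro k hk
    by_cases hv : isEasyVow c = true
    · have h0 := ih 0 (by omega)
      norm_num at h0
      simp only [isEasyLoop, hv, isEasyLead, if_pos]
      norm_num
      rw [h0, w_cons_vowel c rest hv]
      by_cases hl : isEasyLead rest ≤ 3
      · simp [hl, hk]
      · rw [w_false_of_lead rest (by omega)]; simp
    · simp only [isEasyLoop, hv, isEasyLead, Bool.not_eq_true' ]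
      norm_num
      by_cases h3 : k = 3
      · subst h3
        have h1 : ¬ (3 + (isEasyLead rest + 1) ≤ 3) := by omega
        simp [h1]
      · have h2 : ¬ ((4:Int) ≤ (k : Int) + 1) := by omega
        simp only [h2, decide_false, Bool.not_false, Bool.true_and]
        rw [show ((k : Int) + 1) = ((k + 1 : Nat) : Int) from by push_cast; ring,
            ih (k + 1) (by omega)]
        by_cases hl : k + 1 + isEasyLead rest ≤ 3
        · rw [w_cons_of_lead_le c rest (by omega)]
          simp [hl]; omega
        · have h1 : ¬ (k + (isEasyLead rest + 1) ≤ 3) := by omega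
          simp [hl, h1]

lemma a_eq_w (l : List Char) : isEasyLoop l 0 = isEasyW l := by
  have h := loopA_eq l 0 (by omega)
  norm_num at h
  rw [h]
  by_cases hl : isEasyLead l ≤ 3
  · simp [hl]
  · rw [w_false_of_lead l (by omega)]; simp

lemma w_iff (l : List Char) : isEasyW l = true ↔
    ∀ j : Nat, j + 4 ≤ l.length → ((l.drop j).take 4).any isEasyVow = true := by
  induction l with
  | nil => simp [isEasyW]
  | cons a rest ih =>
    rcases rest with _ | ⟨b, _ | ⟨c, _ | ⟨d, r⟩⟩⟩
    · simp only [isEasyW, true_iff]; intro j hj; simp at hj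
    · simp only [isEasyW, true_iff]; intro j hj; simp at hj
    · simp only [isEasyW, true_iff]; intro j hj; simp at hj
    · rw [show isEasyW (a :: b :: c :: d :: r) =
          ((isEasyVow a || isEasyVow b || isEasyVow c || isEasyVow d) &&
            isEasyW (b :: c :: d :: r)) from rfl]
      rw [Bool.and_eq_true, ih]
      constructor
      · rintro ⟨hhead, htail⟩ j hj
        cases j with
        | zero => simp [List.any] at hhead ⊢; tauto
        | succ j' =>
          have := htail j' (by simp at hj ⊢; omega)
          simpa using this
      · intro h
        refine ⟨?_, ?_⟩
        · have := h 0 (by simp)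
          simp [List.any] at this ⊢; tauto
        · intro j hj
          have := h (j + 1) (by simp at hj ⊢; omega)
          simpa using this

lemma b_iff (l : List Char) :
    ((PySem.List.pyRange 0 ((l.length : Int) - 3) 1).all (fun i =>
      (PySem.List.slice l (some i) (some (i + 4))).any isEasyVow)) = true ↔
    ∀ j : Nat, j + 4 ≤ l.length → ((l.drop j).take 4).any isEasyVow = true := by
  rw [List.all_eq_true]
  constructor
  · intro h j hj
    have hm : (j : Int) ∈ PySem.List.pyRange 0 ((l.length : Int) - 3) 1 := by
      rw [PySem.List.mem_pyRange_one]; omega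
    have := h _ hm
    rw [show ((j : Int) + 4) = ((j : Int) + ((4 : Nat) : Int)) from by norm_num,
        PySem.List.slice_natCast_add] at this
    exact this
  · intro h i hi
    rw [PySem.List.mem_pyRange_one] at hi
    obtain ⟨j, rfl⟩ : ∃ j : Nat, i = (j : Int) := ⟨i.toNat, by omega⟩
    rw [show ((j : Int) + 4) = ((j : Int) + ((4 : Nat) : Int)) from by norm_num,
        PySem.List.slice_natCast_add]
    exact h j (by omega)

-- ===== VERDICT (by name: the statement is the Claim_ definition above) =====
theorem is_easy_spec : Claim_equal_is_easy := by
  intro s _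
  unfold Spec_is_easy is_easy is_easy_alt
  rw [a_eq_w]
  rw [Bool.eq_iff_iff, w_iff, b_iff]
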